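-- pv_equiv track=rewrite | github.com/ShanHuang08/Python-repository | CodeWars/CodeWars1115.py | question1_2
-- ===== SOURCE A (Python) =====
-- def question1_2(text): #better
--     rtext=''
--     for i in range(len(text)-1,-1,-1): #將全部字串反轉
--         rtext=rtext+text[i]
--
--     List=rtext.split(' ') #將字串變成列表
--     answer=''
--     for j in range(len(List)-1,-1,-1): #把列表反向
--         answer=answer+List[j]+' '
--     return answer
-- ===== SOURCE B (Python) =====
-- def question1_2(text):
--     # reverse each space-delimited token in place, keep token order; the
--     # unconditional trailing space matches the original's output shape
--     return ' '.join(p[::-1] for p in text.split(' ')) + ' '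
-- ===== Notes on version B (the rewrite author's own statement) =====
-- stated objective: faster
-- what changed: B reverses each space-delimited token directly in one split/join pass, instead of A reversing the whole string character-by-character via repeated string concatenation and then reversing the resulting word list with a second index loop.
import Mathlib
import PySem

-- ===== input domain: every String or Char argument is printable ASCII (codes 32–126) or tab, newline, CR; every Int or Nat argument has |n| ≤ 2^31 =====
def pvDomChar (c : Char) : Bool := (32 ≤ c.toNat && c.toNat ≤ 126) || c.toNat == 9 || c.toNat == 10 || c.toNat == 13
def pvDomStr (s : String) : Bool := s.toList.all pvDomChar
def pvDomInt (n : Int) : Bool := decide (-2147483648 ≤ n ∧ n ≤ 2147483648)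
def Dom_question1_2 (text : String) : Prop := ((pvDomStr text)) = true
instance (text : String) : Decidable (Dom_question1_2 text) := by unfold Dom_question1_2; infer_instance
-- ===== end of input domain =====

-- B reverses each space-delimited token directly in one split/join pass instead of A's
-- reverse-the-whole-string-then-reverse-the-word-list double concatenation loop; same return value.

-- ===== PORT A =====
def question1_2 (text : String) : String :=
  let s := text.toList
  -- rtext = '' ; for i in range(len(text)-1,-1,-1): rtext = rtext + text[i]
  let rtext := (PySem.List.pyRange ((s.length : Int) - 1) (-1) (-1)).foldl
      (fun acc i => acc ++ [PySem.List.pyGetD s i ' ']) ([] : List Char)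
  -- List = rtext.split(' ')
  let L := PySem.Chars.splitOn rtext [' ']
  -- answer = '' ; for j in range(len(List)-1,-1,-1): answer = answer + List[j] + ' '
  let answer := (PySem.List.pyRange ((L.length : Int) - 1) (-1) (-1)).foldl
      (fun acc j => acc ++ (PySem.List.pyGetD L j [] ++ [' '])) ([] : List Char)
  String.ofList answer

-- ===== PORT B =====
def question1_2_alt (text : String) : String :=
  -- ' '.join(p[::-1] for p in text.split(' ')) + ' '
  let parts := PySem.Chars.splitOn text.toList [' ']
  String.ofList (PySem.Chars.join [' '] (parts.map List.reverse) ++ [' '])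

-- ===== PRECONDITION & SPEC =====
def Spec_question1_2 (text : String) (out : String) : Prop := out = question1_2_alt text
instance (text : String) (out : String) : Decidable (Spec_question1_2 text out) := by unfold Spec_question1_2; infer_instance

-- ===== CLAIM (what is proved, stated in full; the proofs are below) =====
def Claim_equal_question1_2 : Prop := ∀ (text : String), Dom_question1_2 text → Spec_question1_2 text (question1_2 text)

-- ===== LEMMAS AND PROOFS =====

lemma modifyHead_id' (l : List (List Char)) : List.modifyHead (fun w => w) l = l := by
  cases l <;> simp

-- PySem.Chars.splitOn with a single-character separator is Mathlib's List.splitOn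
lemma splitOn_go_eq (d : Char) : ∀ (fuel : Nat) (l cur : List Char) (acc : List (List Char)), l.length ≤ fuel →
    PySem.Chars.splitOn.go [d] fuel l cur acc
      = acc.reverse ++ (List.splitOn d l).modifyHead (fun w => cur.reverse ++ w) := by
  intro fuel
  induction fuel with
  | zero =>
    intro l cur acc h
    have : l = [] := List.length_eq_zero_iff.mp (Nat.le_zero.mp h)
    subst this
    rw [PySem.Chars.splitOn.go]
    simp [List.splitOn, List.splitOnP_nil]
  | succ n ih =>
    intro l cur acc h
    cases l with
    | nil =>
      rw [PySem.Chars.splitOn.go]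
      · simp [List.splitOn, List.splitOnP_nil]
      · omega
    | cons c rest =>
      have hlen : rest.length ≤ n := by simpa using h
      by_cases hc : c = d
      · subst hc
        rw [show PySem.Chars.splitOn.go [c] (n+1) (c :: rest) cur acc
              = PySem.Chars.splitOn.go [c] n rest [] (cur.reverse :: acc) by
            rw [PySem.Chars.splitOn.go]; simp [List.isPrefixOf]]
        rw [ih rest [] (cur.reverse :: acc) hlen]
        simp [List.splitOn, List.splitOnP_cons, modifyHead_id']
      · rw [show PySem.Chars.splitOn.go [d] (n+1) (c :: rest) cur acc
              = PySem.Chars.splitOn.go [d] n rest (c :: cur) acc by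
            rw [PySem.Chars.splitOn.go]; simp [List.isPrefixOf, Ne.symm hc]]
        rw [ih rest (c :: cur) acc hlen]
        have hne : (c == d) = false := by simp [hc]
        obtain ⟨p, ps, hsp⟩ : ∃ p ps, List.splitOnP (fun x => x == d) rest = p :: ps := by
          cases hx : List.splitOnP (fun x => x == d) rest with
          | nil => exact absurd hx (List.splitOnP_ne_nil _ _)
          | cons p ps => exact ⟨p, ps, rfl⟩
        simp [List.splitOn, List.splitOnP_cons, hne, hsp]

lemma chars_splitOn_eq (d : Char) (l : List Char) :
    PySem.Chars.splitOn l [d] = List.splitOn d l := by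
  have h := splitOn_go_eq d (l.length + 1) l [] [] (by omega)
  simpa [PySem.Chars.splitOn, modifyHead_id'] using h

lemma splitOn_ne_nil (d : Char) (l : List Char) : List.splitOn d l ≠ [] :=
  List.splitOnP_ne_nil _ _

lemma not_mem_splitOn (d : Char) (l : List Char) : ∀ w ∈ List.splitOn d l, d ∉ w := by
  induction l with
  | nil => simp [List.splitOn, List.splitOnP_nil]
  | cons c rest ih =>
    intro w hw
    by_cases hc : c = d
    · subst hc
      have hw' : w = [] ∨ w ∈ List.splitOnP (fun x => x == c) rest := by
        simpa [List.splitOn, List.splitOnP_cons] using hw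
      rcases hw' with h | h
      · simp [h]
      · exact ih w (by simpa [List.splitOn] using h)
    · have hne : (c == d) = false := by simp [hc]
      obtain ⟨p, ps, hsp⟩ : ∃ p ps, List.splitOnP (fun x => x == d) rest = p :: ps := by
        cases hx : List.splitOnP (fun x => x == d) rest with
        | nil => exact absurd hx (List.splitOnP_ne_nil _ _)
        | cons p ps => exact ⟨p, ps, rfl⟩
      simp [List.splitOn, List.splitOnP_cons, hne, hsp] at hw
      rcases hw with h | h
      · subst h
        have hp : d ∉ p := ih p (by simp [List.splitOn, hsp])
        simp [hp, Ne.symm hc]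
      · exact ih w (by simp [List.splitOn, hsp, h])

lemma intercalate_append_singleton (d : Char) :
    ∀ (xs : List (List Char)) (y : List Char), xs ≠ [] →
      List.intercalate [d] (xs ++ [y]) = List.intercalate [d] xs ++ [d] ++ y := by
  intro xs
  induction xs with
  | nil => intro y h; exact absurd rfl h
  | cons a t ih =>
    intro y _
    cases t with
    | nil => simp [List.intercalate, List.intersperse]
    | cons b t' =>
      have := ih y (by simp)
      simp only [List.cons_append]
      simp [List.intercalate, List.intersperse] at this ⊢
      simp [this]

lemma rev_intercalate (d : Char) :
    ∀ (ls : List (List Char)),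
      (List.intercalate [d] ls).reverse = List.intercalate [d] ((ls.map List.reverse).reverse) := by
  intro ls
  induction ls with
  | nil => simp [List.intercalate]
  | cons a t ih =>
    cases t with
    | nil => simp [List.intercalate, List.intersperse]
    | cons b t' =>
      have hne : ((b :: t').map List.reverse).reverse ≠ [] := by simp
      calc (List.intercalate [d] (a :: b :: t')).reverse
          = (a ++ [d] ++ List.intercalate [d] (b :: t')).reverse := by
            simp [List.intercalate, List.intersperse]
        _ = (List.intercalate [d] (b :: t')).reverse ++ [d] ++ a.reverse := by
            simp
        _ = List.intercalate [d] (((b :: t').map List.reverse).reverse) ++ [d] ++ a.reverse := by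
            rw [ih]
        _ = List.intercalate [d] ((((b :: t').map List.reverse).reverse) ++ [a.reverse]) := by
            rw [intercalate_append_singleton d _ _ hne]
        _ = List.intercalate [d] (((a :: b :: t').map List.reverse).reverse) := by
            simp

lemma splitOn_reverse (d : Char) (l : List Char) :
    List.splitOn d l.reverse = ((List.splitOn d l).map List.reverse).reverse := by
  have h1 : [d].intercalate (List.splitOn d l) = l := List.intercalate_splitOn l d
  have h2 : l.reverse = [d].intercalate (((List.splitOn d l).map List.reverse).reverse) := by
    conv_lhs => rw [← h1]
    exact rev_intercalate d _
  rw [h2]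
  apply List.splitOn_intercalate
  · intro w hw
    rw [List.mem_reverse, List.mem_map] at hw
    obtain ⟨w', hw', hww⟩ := hw
    intro hd
    rw [← hww, List.mem_reverse] at hd
    exact not_mem_splitOn d l w' hw' hd
  · simpa using splitOn_ne_nil d l

lemma flatMap_append_sep (d : Char) :
    ∀ (ws : List (List Char)), ws ≠ [] →
      ws.flatMap (fun w => w ++ [d]) = List.intercalate [d] ws ++ [d] := by
  intro ws
  induction ws with
  | nil => intro h; exact absurd rfl h
  | cons a t ih =>
    intro _
    cases t with
    | nil => simp [List.intercalate, List.intersperse]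
    | cons b t' =>
      have := ih (by simp)
      simp only [List.flatMap_cons] at this ⊢
      rw [this]
      simp [List.intercalate, List.intersperse]

-- the countdown append-loop is a flatMap over the reversed forward range
lemma countdown_loop {β : Type} (g : Int → List β) (n : Nat) :
    (PySem.List.pyRange ((n : Int) - 1) (-1) (-1)).foldl (fun acc i => acc ++ g i) []
      = (((PySem.List.pyRange 0 (n : Int) 1).map g).reverse).flatten := by
  rw [PySem.List.foldl_append_eq_flatMap]
  rw [PySem.List.pyRange_neg_one_eq_reverse]
  have : (-1 : Int) + 1 = 0 := by ring
  rw [this, show ((n : Int) - 1) + 1 = (n : Int) by ring]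
  simp [List.flatMap_def, List.map_reverse]

lemma first_loop (s : List Char) :
    (PySem.List.pyRange ((s.length : Int) - 1) (-1) (-1)).foldl
      (fun acc i => acc ++ [PySem.List.pyGetD s i ' ']) [] = s.reverse := by
  rw [countdown_loop (fun i => [PySem.List.pyGetD s i ' ']) s.length]
  have hm : (PySem.List.pyRange 0 (s.length : Int) 1).map (fun i => [PySem.List.pyGetD s i ' '])
      = s.map (fun c => [c]) := by
    have := PySem.List.map_pyGetD_pyRange_zero s ' '
    calc (PySem.List.pyRange 0 (s.length : Int) 1).map (fun i => [PySem.List.pyGetD s i ' '])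
        = ((PySem.List.pyRange 0 (s.length : Int) 1).map (fun i => PySem.List.pyGetD s i ' ')).map (fun c => [c]) := by
          rw [List.map_map]; rfl
      _ = s.map (fun c => [c]) := by
          rw [show (PySem.List.pyRange 0 (s.length : Int) 1).map (fun i => PySem.List.pyGetD s i ' ') = s by
            simpa [PySem.List.len] using this]
  rw [hm, ← List.map_reverse, ← List.flatMap_def]
  simp

lemma second_loop (L : List (List Char)) :
    (PySem.List.pyRange ((L.length : Int) - 1) (-1) (-1)).foldl
      (fun acc j => acc ++ (PySem.List.pyGetD L j [] ++ [' '])) []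
      = L.reverse.flatMap (fun w => w ++ [' ']) := by
  rw [countdown_loop (fun j => PySem.List.pyGetD L j [] ++ [' ']) L.length]
  have hm : (PySem.List.pyRange 0 (L.length : Int) 1).map (fun j => PySem.List.pyGetD L j [] ++ [' '])
      = L.map (fun w => w ++ [' ']) := by
    have := PySem.List.map_pyGetD_pyRange_zero L []
    calc (PySem.List.pyRange 0 (L.length : Int) 1).map (fun j => PySem.List.pyGetD L j [] ++ [' '])
        = ((PySem.List.pyRange 0 (L.length : Int) 1).map (fun j => PySem.List.pyGetD L j [])).map (fun w => w ++ [' ']) := by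
          rw [List.map_map]; rfl
      _ = L.map (fun w => w ++ [' ']) := by
          rw [show (PySem.List.pyRange 0 (L.length : Int) 1).map (fun j => PySem.List.pyGetD L j []) = L by
            simpa [PySem.List.len] using this]
  rw [hm, ← List.map_reverse, List.flatMap_def]

-- ===== VERDICT (by name: the statement is the Claim_ definition above) =====
theorem question1_2_spec : Claim_equal_question1_2 := by
  intro text _
  unfold Spec_question1_2 question1_2 question1_2_alt
  dsimp only
  set s := text.toList with hs
  rw [first_loop s, chars_splitOn_eq, splitOn_reverse, second_loop]
  rw [List.reverse_reverse]
  rw [flatMap_append_sep ' ' _ (by simpa using splitOn_ne_nil ' ' s)]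
  rw [chars_splitOn_eq]
  simp [PySem.Chars.join]
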